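-- pv_equiv track=rewrite | github.com/miliar/Code_Jam_Webscraper | Solutions_python/Problem_201/2657.py | Ls
-- ===== SOURCE A (Python) =====
-- def Ls(stalls, s):
--     L = 0
--     for i in range(s-1,0,-1):
--         if stalls[i] == 0:
--             L += 1
--         else:
--             break
--     return L
-- ===== SOURCE B (Python) =====
-- def Ls(stalls, s):
--     if s < 1:
--         return 0
--     run = 0
--     for x in stalls[1:s]:
--         run = run + 1 if x == 0 else 0
--     return run
-- ===== Notes on version B (the rewrite author's own statement) =====
-- stated objective: alternative
-- what changed: Replaces A's backward walk over indices range(s-1,0,-1) with a break at the first nonzero by a single forward pass over the slice stalls[1:s] that maintains the current trailing run of zeros (reset on nonzero), with a guard s < 1 reproducing the empty range; no indexing or break remains.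
import Mathlib
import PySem

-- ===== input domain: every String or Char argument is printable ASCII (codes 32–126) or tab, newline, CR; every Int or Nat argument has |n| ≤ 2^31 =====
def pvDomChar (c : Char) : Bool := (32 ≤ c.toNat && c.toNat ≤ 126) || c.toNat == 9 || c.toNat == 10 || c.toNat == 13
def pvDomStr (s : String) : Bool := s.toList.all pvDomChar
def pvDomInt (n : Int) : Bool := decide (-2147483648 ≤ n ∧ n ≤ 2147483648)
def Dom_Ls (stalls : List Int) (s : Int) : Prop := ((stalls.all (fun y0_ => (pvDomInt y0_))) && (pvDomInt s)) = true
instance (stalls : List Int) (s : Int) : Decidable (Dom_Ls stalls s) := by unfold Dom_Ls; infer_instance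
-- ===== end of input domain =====

-- B replaces A's backward index walk with a break by a single forward pass over the
-- slice stalls[1:s] that maintains the current trailing run of zeros (objective: alternative).

-- ===== PORT A =====
-- A's for-loop over range(s-1, 0, -1) with break at the first nonzero stall.
def LsLoop (stalls : List Int) : List Int → Int → Int
  | [], L => L
  | i :: rest, L =>
    match PySem.List.pyGet? stalls i with
    | none => L   -- IndexError in Python; Pre_Ls excludes exactly these inputs
    | some v => if v = 0 then LsLoop stalls rest (L + 1) else L

def Ls (stalls : List Int) (s : Int) : Int :=
  LsLoop stalls (PySem.List.pyRange (s - 1) 0 (-1)) 0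

-- ===== PORT B =====
def Ls_alt (stalls : List Int) (s : Int) : Int :=
  if s < 1 then 0
  else (PySem.List.slice stalls (some 1) (some s)).foldl
         (fun run x => if x == 0 then run + 1 else 0) 0

-- ===== PRECONDITION & SPEC =====
-- A raises IndexError iff 2 ≤ s and s exceeds len(stalls) (the first index read is s-1).
def Pre_Ls (stalls : List Int) (s : Int) : Prop := 2 ≤ s → s ≤ (stalls.length : Int)
instance (stalls : List Int) (s : Int) : Decidable (Pre_Ls stalls s) := by unfold Pre_Ls; infer_instance
def pvWitness_Ls : List Int × Int := ([0, 1, 0], 3)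

def Spec_Ls (stalls : List Int) (s : Int) (out : Int) : Prop := out = Ls_alt stalls s
instance (stalls : List Int) (s : Int) (out : Int) : Decidable (Spec_Ls stalls s out) := by unfold Spec_Ls; infer_instance

-- ===== CLAIM (what is proved, stated in full; the proofs are below) =====
def Claim_equal_Ls : Prop := ∀ (stalls : List Int) (s : Int), Dom_Ls stalls s → Pre_Ls stalls s → Spec_Ls stalls s (Ls stalls s)

-- ===== LEMMAS AND PROOFS =====

lemma loopA (stalls : List Int) (k : Nat) (hk : k + 1 ≤ stalls.length) (L : Int) :
    LsLoop stalls (PySem.List.pyRange (k : Int) 0 (-1)) L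
      = L + ((stalls.drop 1).take k).foldl (fun run x => if x == 0 then run + 1 else 0) 0 := by
  induction k generalizing L with
  | zero => simp [PySem.List.pyRange_neg_one_eq_nil (by omega : (0:Int) ≤ 0), LsLoop]
  | succ k ih =>
    have hlt : k + 1 < stalls.length := by omega
    obtain ⟨v, hv⟩ : ∃ v, stalls[k + 1]? = some v := ⟨_, List.getElem?_eq_getElem hlt⟩
    have hcons : PySem.List.pyRange ((k + 1 : Nat) : Int) 0 (-1)
        = ((k + 1 : Nat) : Int) :: PySem.List.pyRange (((k + 1 : Nat) : Int) - 1) 0 (-1) :=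
      PySem.List.pyRange_neg_one_cons (by exact_mod_cast Nat.succ_pos k)
    have hget : PySem.List.pyGet? stalls ((k + 1 : Nat) : Int) = some v := by
      rw [PySem.List.pyGet?_natCast, hv]
    have htake : (stalls.drop 1).take (k + 1) = (stalls.drop 1).take k ++ [v] := by
      rw [List.take_add_one]
      simpa using hv
    rw [hcons]
    have hstep : (((k + 1 : Nat) : Int) - 1) = ((k : Nat) : Int) := by push_cast; ring
    rw [hstep]
    show (match PySem.List.pyGet? stalls ((k + 1 : Nat) : Int) with
      | none => L
      | some v => if v = 0 then LsLoop stalls (PySem.List.pyRange (k : Int) 0 (-1)) (L + 1) else L) = _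
    rw [hget, htake, List.foldl_append]
    by_cases hv0 : v = 0
    · simp only [hv0, ih (by omega) (L + 1)]
      simp
      ring
    · simp [hv0]

-- ===== VERDICT (by name: the statement is the Claim_ definition above) =====
theorem Ls_spec : Claim_equal_Ls := by
  intro stalls s _ hpre
  unfold Spec_Ls Ls Ls_alt
  by_cases hs : s < 1
  · rw [if_pos hs, PySem.List.pyRange_neg_one_eq_nil (by omega : s - 1 ≤ 0)]
    rfl
  · rw [if_neg hs]
    obtain ⟨k, hsk⟩ : ∃ k : Nat, s = (k : Int) + 1 := ⟨(s - 1).toNat, by omega⟩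
    subst hsk
    have hrange : (k : Int) + 1 - 1 = ((k : Nat) : Int) := by ring
    have hslice : PySem.List.slice stalls (some 1) (some ((k : Int) + 1))
        = (stalls.drop 1).take k := by
      have h1 : ((k : Int) + 1) = ((k + 1 : Nat) : Int) := by push_cast; ring
      have h2 : (1 : Int) = ((1 : Nat) : Int) := rfl
      rw [h1, h2, PySem.List.slice_natCast]
      simp
    rw [hrange, hslice]
    rcases Nat.eq_zero_or_pos k with hk0 | hkpos
    · subst hk0
      simp [LsLoop]
    · have hk1 : k + 1 ≤ stalls.length := by
        have := hpre (by omega)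
        omega
      rw [loopA stalls k hk1 0]
      ring
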